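-- pv_equiv track=rewrite | github.com/jamesrwarren/carbon-calculator | project/commands/ingredients/ingredients.py | ingredients_to_list
-- ===== SOURCE A (Python) =====
-- def ingredients_to_list(ingredients):
--     list_of_terms = []
--     current_term = ''
--     seperators = ['[', '(', ')', ']', ',']
--     for letter in ingredients:
--         if letter not in seperators:
--             current_term = f'{current_term}{letter}'
--         elif letter in seperators:
--             if len(current_term.strip()) > 0:
--                 list_of_terms.append(current_term.strip())
--             current_term = ''
--             if letter not in [',']:
--                 list_of_terms.append(letter)
--
--     return list_of_terms
-- ===== SOURCE B (Python) =====
-- def ingredients_to_list(ingredients):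
--     seps = '[](),'
--     tokens = []
--     rest = ingredients
--     while True:
--         k = 0
--         while k < len(rest) and rest[k] not in seps:
--             k += 1
--         if k == len(rest):
--             return tokens  # trailing unterminated text is dropped
--         term = rest[:k].strip()
--         if term:
--             tokens.append(term)
--         if rest[k] != ',':
--             tokens.append(rest[k])
--         rest = rest[k + 1:]
-- ===== Notes on version B (the rewrite author's own statement) =====
-- stated objective: faster
-- what changed: B scans to the next separator and slices out each whole segment (one strip per segment), instead of A's per-character loop that rebuilds the growing term string with an f-string on every character.
import Mathlib
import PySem

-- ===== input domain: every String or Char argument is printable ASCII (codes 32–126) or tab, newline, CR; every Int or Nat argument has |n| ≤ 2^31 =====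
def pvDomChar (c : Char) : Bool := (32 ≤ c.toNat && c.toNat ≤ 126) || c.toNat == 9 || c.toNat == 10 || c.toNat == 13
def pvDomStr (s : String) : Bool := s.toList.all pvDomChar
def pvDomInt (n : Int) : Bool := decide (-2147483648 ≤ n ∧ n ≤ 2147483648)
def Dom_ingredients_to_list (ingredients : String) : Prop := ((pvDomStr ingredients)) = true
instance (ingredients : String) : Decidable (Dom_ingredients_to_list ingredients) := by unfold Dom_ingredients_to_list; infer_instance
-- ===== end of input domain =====

-- B replaces A's per-character accumulation with a scan-to-next-separator loop over whole
-- segments (slice, strip once per segment); same return value on every input (alternative structure).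

-- ===== PORT A =====
-- step of A's for-loop; state = (list_of_terms, current_term)
def pvAStep (st : List String × String) (letter : Char) : List String × String :=
  let seperators : List Char := ['[', '(', ')', ']', ',']
  if ¬ (seperators.contains letter) then
    (st.1, st.2.push letter)
  else
    let terms :=
      if (PySem.Str.strip st.2).length > 0 then st.1 ++ [PySem.Str.strip st.2] else st.1
    let terms := if ¬ ([','].contains letter) then terms ++ [String.ofList [letter]] else terms
    (terms, "")

def ingredients_to_list (ingredients : String) : List String :=
  (ingredients.toList.foldl pvAStep ([], "")).1

-- ===== PORT B =====
def pvIsSep (c : Char) : Bool := ['[', '(', ')', ']', ','].contains c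

-- B's outer while-loop on the remaining suffix `rest`; the inner while computing k is the
-- takeWhile prefix, rest[:k] its value, rest[k+1:] the tail after the separator.
def pvBGo (tokens : List String) (rest : List Char) : List String :=
  let pre := rest.takeWhile (fun c => !(pvIsSep c))
  match h : rest.dropWhile (fun c => !(pvIsSep c)) with
  | [] => tokens
  | sep :: rest' =>
    let term := PySem.Chars.strip pre
    let tokens := if term ≠ [] then tokens ++ [String.ofList term] else tokens
    let tokens := if sep ≠ ',' then tokens ++ [String.ofList [sep]] else tokens
    pvBGo tokens rest'
termination_by rest.length
decreasing_by
  have hle : (rest.dropWhile (fun c => !(pvIsSep c))).length ≤ rest.length :=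
    List.length_dropWhile_le _ _
  rw [h] at hle
  simpa using Nat.lt_of_lt_of_le (Nat.lt_succ_self _) hle

def ingredients_to_list_alt (ingredients : String) : List String :=
  pvBGo [] ingredients.toList

-- ===== PRECONDITION & SPEC =====
def Spec_ingredients_to_list (ingredients : String) (out : List String) : Prop := out = ingredients_to_list_alt ingredients
instance (ingredients : String) (out : List String) : Decidable (Spec_ingredients_to_list ingredients out) := by unfold Spec_ingredients_to_list; infer_instance

-- ===== CLAIM (what is proved, stated in full; the proofs are below) =====
def Claim_equal_ingredients_to_list : Prop := ∀ (ingredients : String), Dom_ingredients_to_list ingredients → Spec_ingredients_to_list ingredients (ingredients_to_list ingredients)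

-- ===== LEMMAS AND PROOFS =====

-- A's loop over a separator-free prefix only accumulates the characters onto current_term
lemma pvA_fold_nosep (pre : List Char) (terms : List String) (cur : String)
    (hp : ∀ c ∈ pre, pvIsSep c = false) :
    pre.foldl pvAStep (terms, cur) = (terms, String.ofList (cur.toList ++ pre)) := by
  induction pre generalizing cur with
  | nil => simp
  | cons c cs ih =>
    have hc : pvIsSep c = false := hp c (by simp)
    have hrest : ∀ x ∈ cs, pvIsSep x = false := fun x hx => hp x (by simp [hx])
    have hstep : pvAStep (terms, cur) c = (terms, cur.push c) := by
      have hcon : (['[', '(', ')', ']', ','].contains c) = false := hc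
      simp only [pvAStep]
      rw [if_pos (by rw [hcon]; simp)]
    rw [List.foldl_cons, hstep, ih _ hrest]
    simp

-- A's step on a separator character flushes exactly as B's body does
lemma pvA_step_sep (terms : List String) (cur : String) (sep : Char)
    (hs : pvIsSep sep = true) :
    pvAStep (terms, cur) sep =
      ((if PySem.Chars.strip cur.toList ≠ [] then terms ++ [String.ofList (PySem.Chars.strip cur.toList)] else terms) ++
        (if sep ≠ ',' then [String.ofList [sep]] else []), "") := by
  have hcon : (['[', '(', ')', ']', ','].contains sep) = true := hs
  simp only [pvAStep]
  rw [if_neg (by rw [hcon]; simp)]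
  have hstrip : PySem.Str.strip cur = String.ofList (PySem.Chars.strip cur.toList) := rfl
  have hlen : (PySem.Str.strip cur).length = (PySem.Chars.strip cur.toList).length := by
    rw [hstrip]; exact String.length_ofList
  rw [hstrip] at hlen ⊢
  by_cases h1 : PySem.Chars.strip cur.toList = [] <;>
    by_cases h2 : sep = ',' <;>
      simp_all [List.length_pos_iff]

-- the head of a nonempty dropWhile fails the predicate
lemma pvHead_dropWhile {α : Type} (p : α → Bool) (l : List α) (a : α) (t : List α)
    (h : l.dropWhile p = a :: t) : p a = false := by
  induction l with
  | nil => simp at h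
  | cons x xs ih =>
    rw [List.dropWhile_cons] at h
    by_cases hx : p x
    · rw [if_pos hx] at h; exact ih h
    · rw [if_neg hx] at h
      cases h
      simpa using hx

-- main loop correspondence: A's fold from an empty current_term equals B's segment loop
lemma pvMain (rest : List Char) (terms : List String) :
    (rest.foldl pvAStep (terms, "")).1 = pvBGo terms rest := by
  induction hn : rest.length using Nat.strong_induction_on generalizing rest terms with
  | _ n ih =>
  subst hn
  have hsplit : rest.takeWhile (fun c => !(pvIsSep c)) ++ rest.dropWhile (fun c => !(pvIsSep c)) = rest :=
    List.takeWhile_append_dropWhile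
  have hpre : ∀ c ∈ rest.takeWhile (fun c => !(pvIsSep c)), pvIsSep c = false := by
    intro c hc
    have := List.mem_takeWhile_imp hc
    simpa using this
  rw [pvBGo]
  split
  next hd =>
    -- no separator left: A's fold only accumulates, B returns tokens
    rw [hd, List.append_nil] at hsplit
    conv_lhs => rw [← hsplit]
    rw [pvA_fold_nosep _ _ _ hpre]
  next sep rest' hd =>
    have hsep : pvIsSep sep = true := by
      have := pvHead_dropWhile _ _ _ _ hd
      simpa using this
    have hlt : rest'.length < rest.length := by
      have hle : (rest.dropWhile (fun c => !(pvIsSep c))).length ≤ rest.length :=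
        List.length_dropWhile_le _ _
      rw [hd] at hle
      simpa using Nat.lt_of_lt_of_le (Nat.lt_succ_self _) hle
    conv_lhs => rw [← hsplit]
    rw [hd, List.foldl_append, pvA_fold_nosep _ _ _ hpre, List.foldl_cons,
      pvA_step_sep _ _ _ hsep]
    have hcur : (String.ofList (("" : String).toList ++ rest.takeWhile (fun c => !(pvIsSep c)))).toList
        = rest.takeWhile (fun c => !(pvIsSep c)) := by simp
    rw [hcur, ih rest'.length hlt rest' _ rfl]
    by_cases h1 : PySem.Chars.strip (rest.takeWhile (fun c => !(pvIsSep c))) = [] <;>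
      by_cases h2 : sep = ',' <;>
        simp [h1, h2]

-- ===== VERDICT (by name: the statement is the Claim_ definition above) =====
theorem ingredients_to_list_spec : Claim_equal_ingredients_to_list := by
  intro ingredients _
  unfold Spec_ingredients_to_list ingredients_to_list ingredients_to_list_alt
  exact pvMain ingredients.toList []
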